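-- pv_equiv track=rewrite | github.com/snji-khjuria/OntologyBuilder | LocalGlobalContentAttacher.py | getErrorDataStr
-- ===== SOURCE A (Python) =====
-- def getErrorDataStr(content):
--     outputStr = ""
--     for item in content:
--         (sentence, groundTruth) = item
--         sentence = sentence.strip().split()
--         groundTruth = groundTruth.strip().split()
--         outputSentences = [""]
--         for index in range(0, len(sentence)):
--             word = sentence[index]
--             noisyLabelsList = groundTruth[index].split("/")
--             outputBuffer = []
--             for item in outputSentences:
--                 for noisyLabel in noisyLabelsList:
--                     nextContent = word+"/"+noisyLabel
--                     buffer = item+" " + nextContent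
--                     outputBuffer.append(buffer)
--             outputSentences = outputBuffer
--         for item in outputSentences:
--             outputStr+=item+"\n\n"
--     return outputStr
-- ===== SOURCE B (Python) =====
-- def getErrorDataStr(content):
--     # Build the per-word option lists first, then expand them by a
--     # right-recursive Cartesian product (last word varies fastest),
--     # instead of A's incremental left-to-right buffer accumulation.
--     def combos(optionLists):
--         if not optionLists:
--             return [""]
--         rest = combos(optionLists[1:])
--         return [" " + opt + r for opt in optionLists[0] for r in rest]
--
--     lines = []
--     for sentence, groundTruth in content:
--         words = sentence.strip().split()
--         labels = groundTruth.strip().split()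
--         optionLists = [[w + "/" + lab for lab in labels[i].split("/")]
--                        for i, w in enumerate(words)]
--         for line in combos(optionLists):
--             lines.append(line + "\n\n")
--     return "".join(lines)
-- ===== Notes on version B (the rewrite author's own statement) =====
-- stated objective: idiomatic
-- what changed: B precomputes each word's 'word/label' option list and expands them by a right-recursive Cartesian product joined into lines, replacing A's incremental left-to-right buffer accumulation inside a triple nested loop with string-concatenation into a growing output string.
import Mathlib
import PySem

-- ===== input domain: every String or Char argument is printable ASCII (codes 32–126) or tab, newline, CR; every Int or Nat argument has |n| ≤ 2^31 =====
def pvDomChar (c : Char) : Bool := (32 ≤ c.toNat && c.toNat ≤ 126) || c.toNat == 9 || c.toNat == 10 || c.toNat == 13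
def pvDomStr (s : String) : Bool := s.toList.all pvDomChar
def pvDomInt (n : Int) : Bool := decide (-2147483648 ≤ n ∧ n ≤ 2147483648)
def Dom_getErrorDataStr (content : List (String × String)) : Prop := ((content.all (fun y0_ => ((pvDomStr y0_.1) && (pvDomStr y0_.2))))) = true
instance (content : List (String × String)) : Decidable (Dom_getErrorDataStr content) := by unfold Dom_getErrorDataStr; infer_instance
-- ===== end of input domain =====

-- B builds each word's option list once and expands them by a right-recursive Cartesian product
-- joined into one string, replacing A's incremental left-to-right buffer accumulation (objective: idiomatic).

-- ===== PORT A =====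
def getErrorDataStr (content : List (String × String)) : String :=
  content.foldl (fun outputStr item =>
    let sentence := PySem.Str.split₀ (PySem.Str.strip item.1)
    let groundTruth := PySem.Str.split₀ (PySem.Str.strip item.2)
    let outputSentences :=
      (PySem.List.pyRange 0 (PySem.List.len sentence) 1).foldl
        (fun outputSentences index =>
          let word := PySem.List.pyGetD sentence index ""
          -- groundTruth[index] raises IndexError when index is out of range; Pre_ excludes exactly
          -- those inputs, so the "" default of pyGetD is never reached under Pre_.
          -- split? is none only for an empty separator; the separator here is "/", so .getD [] is exact.
          let noisyLabelsList := (PySem.Str.split? (PySem.List.pyGetD groundTruth index "") "/").getD []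
          outputSentences.foldl (fun outputBuffer itm =>
            noisyLabelsList.foldl (fun outputBuffer noisyLabel =>
              let nextContent := word ++ "/" ++ noisyLabel
              let buffer := itm ++ " " ++ nextContent
              outputBuffer ++ [buffer]) outputBuffer) []) [""]
    outputSentences.foldl (fun outputStr itm => outputStr ++ itm ++ "\n\n") outputStr) ""

-- ===== PORT B =====
-- right-recursive Cartesian product of the option lists (combos in Source B)
def pvCombos : List (List String) → List String
  | [] => [""]
  | opts :: restLists =>
    let rest := pvCombos restLists
    opts.flatMap (fun opt => rest.map (fun r => " " ++ opt ++ r))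

-- the per-word option lists (the optionLists comprehension in Source B);
-- labels[i] raises IndexError out of range (excluded by Pre_), so pyGetD's "" is never reached under Pre_
def pvOptionLists (words labels : List String) : List (List String) :=
  (PySem.List.enumerate words).map (fun p =>
    ((PySem.Str.split? (PySem.List.pyGetD labels p.1 "") "/").getD []).map (fun lab => p.2 ++ "/" ++ lab))

def getErrorDataStr_alt (content : List (String × String)) : String :=
  PySem.Str.join "" (content.flatMap (fun item =>
    let words := PySem.Str.split₀ (PySem.Str.strip item.1)
    let labels := PySem.Str.split₀ (PySem.Str.strip item.2)
    (pvCombos (pvOptionLists words labels)).map (fun line => line ++ "\n\n")))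

-- ===== PRECONDITION & SPEC =====
-- Pre_ excludes exactly the inputs where some sentence has more whitespace-words than its
-- groundTruth: there both A and B raise IndexError (groundTruth[index] / labels[i]).
def Pre_getErrorDataStr (content : List (String × String)) : Prop :=
  ∀ p ∈ content,
    (PySem.Str.split₀ (PySem.Str.strip p.1)).length ≤ (PySem.Str.split₀ (PySem.Str.strip p.2)).length
instance (content : List (String × String)) : Decidable (Pre_getErrorDataStr content) := by
  unfold Pre_getErrorDataStr; infer_instance
def pvWitness_getErrorDataStr : (List (String × String)) := [("the dog", "D/N V"), ("", "")]
def Spec_getErrorDataStr (content : List (String × String)) (out : String) : Prop := out = getErrorDataStr_alt content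
instance (content : List (String × String)) (out : String) : Decidable (Spec_getErrorDataStr content out) := by unfold Spec_getErrorDataStr; infer_instance

-- ===== CLAIM (what is proved, stated in full; the proofs are below) =====
def Claim_equal_getErrorDataStr : Prop := ∀ (content : List (String × String)), Dom_getErrorDataStr content → Pre_getErrorDataStr content → Spec_getErrorDataStr content (getErrorDataStr content)

-- ===== LEMMAS AND PROOFS =====

lemma pv_join_foldl (l : List String) (a : String) :
    l.foldl (· ++ ·) a = a ++ String.join l := by
  induction l generalizing a with
  | nil => simp [String.join, String.append_empty]
  | cons x xs ih =>
    rw [List.foldl_cons, ih]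
    have h : String.join (x :: xs) = List.foldl (· ++ ·) ("" ++ x) xs := rfl
    rw [h, ih, String.empty_append, String.append_assoc]

lemma pv_join_cons (x : String) (l : List String) :
    String.join (x :: l) = x ++ String.join l := by
  have h : String.join (x :: l) = List.foldl (· ++ ·) ("" ++ x) l := rfl
  rw [h, pv_join_foldl, String.empty_append]

lemma pv_join_append (l₁ l₂ : List String) :
    String.join (l₁ ++ l₂) = String.join l₁ ++ String.join l₂ := by
  have h : String.join (l₁ ++ l₂) = List.foldl (· ++ ·) (List.foldl (· ++ ·) "" l₁) l₂ :=
    List.foldl_append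
  rw [h, pv_join_foldl]
  rfl

lemma pv_strjoin_cons (p : String) (ps : List String) :
    PySem.Str.join "" (p :: ps) = p ++ PySem.Str.join "" ps := by
  apply String.toList_inj.mp
  cases ps with
  | nil => simp [PySem.Str.toList_join, PySem.Chars.join_singleton, PySem.Chars.join_nil]
  | cons q r =>
    simp only [PySem.Str.toList_join, List.map_cons, String.toList_append]
    rw [PySem.Chars.join_cons_cons]
    simp

lemma pv_strjoin_empty (parts : List String) :
    PySem.Str.join "" parts = String.join parts := by
  induction parts with
  | nil =>
    apply String.toList_inj.mp
    simp [PySem.Str.toList_join, PySem.Chars.join_nil, String.join]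
  | cons p ps ih => rw [pv_strjoin_cons, ih, pv_join_cons]

lemma pv_lines (l : List String) (a : String) :
    l.foldl (fun o x => o ++ x ++ "\n\n") a = a ++ String.join (l.map (· ++ "\n\n")) := by
  induction l generalizing a with
  | nil => simp [String.join, String.append_empty]
  | cons x xs ih =>
    rw [List.foldl_cons, ih, List.map_cons, pv_join_cons]
    simp [String.append_assoc]

lemma pv_comb (noisy : Int → List String) (w : Int → String)
    (idxs : List Int) (a : List String) :
    idxs.foldl (fun acc index =>
        acc.flatMap (fun itm =>
          (noisy index).map (fun lab => itm ++ " " ++ (w index ++ "/" ++ lab)))) a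
    = a.flatMap (fun s =>
        (pvCombos (idxs.map (fun index =>
          (noisy index).map (fun lab => w index ++ "/" ++ lab)))).map (fun c => s ++ c)) := by
  induction idxs generalizing a with
  | nil => simp [pvCombos, String.append_empty]
  | cons i rest ih =>
    rw [List.foldl_cons, ih, List.flatMap_assoc]
    simp [pvCombos, List.flatMap_map, List.map_flatMap, List.map_map, Function.comp_def,
      String.append_assoc]

lemma pv_item_gen (noisy : Int → List String) (w : Int → String)
    (idxs : List Int) (a : List String) :
    idxs.foldl (fun outputSentences index =>
        outputSentences.foldl (fun outputBuffer itm =>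
          (noisy index).foldl (fun outputBuffer noisyLabel =>
            outputBuffer ++ [itm ++ " " ++ (w index ++ "/" ++ noisyLabel)]) outputBuffer) []) a
    = a.flatMap (fun s =>
        (pvCombos (idxs.map (fun index =>
          (noisy index).map (fun lab => w index ++ "/" ++ lab)))).map (fun c => s ++ c)) := by
  simp only [PySem.List.foldl_append_singleton_eq_map, PySem.List.foldl_append_eq_flatMap,
    List.nil_append]
  exact pv_comb noisy w idxs a

lemma pv_optionLists_eq (words labels : List String) :
    pvOptionLists words labels
      = (PySem.List.pyRange 0 (PySem.List.len words) 1).map (fun index =>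
          ((PySem.Str.split? (PySem.List.pyGetD labels index "") "/").getD []).map
            (fun lab => PySem.List.pyGetD words index "" ++ "/" ++ lab)) := by
  rw [pvOptionLists, PySem.List.enumerate_eq_map_pyRange (d := ""), List.map_map]
  rfl

lemma pv_item (words labels : List String) :
    (PySem.List.pyRange 0 (PySem.List.len words) 1).foldl
      (fun outputSentences index =>
        outputSentences.foldl (fun outputBuffer itm =>
          ((PySem.Str.split? (PySem.List.pyGetD labels index "") "/").getD []).foldl
            (fun outputBuffer noisyLabel =>
              outputBuffer ++ [itm ++ " " ++ (PySem.List.pyGetD words index "" ++ "/" ++ noisyLabel)])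
            outputBuffer) []) [""]
    = pvCombos (pvOptionLists words labels) := by
  rw [pv_item_gen, pv_optionLists_eq]
  simp [String.empty_append]

lemma pv_main (content : List (String × String)) (a : String) :
    content.foldl (fun outputStr item =>
      ((PySem.List.pyRange 0 (PySem.List.len (PySem.Str.split₀ (PySem.Str.strip item.1))) 1).foldl
        (fun outputSentences index =>
          outputSentences.foldl (fun outputBuffer itm =>
            ((PySem.Str.split? (PySem.List.pyGetD (PySem.Str.split₀ (PySem.Str.strip item.2)) index "") "/").getD []).foldl
              (fun outputBuffer noisyLabel =>
                outputBuffer ++ [itm ++ " " ++ (PySem.List.pyGetD (PySem.Str.split₀ (PySem.Str.strip item.1)) index "" ++ "/" ++ noisyLabel)])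
              outputBuffer) []) [""]).foldl
        (fun outputStr itm => outputStr ++ itm ++ "\n\n") outputStr) a
    = a ++ String.join (content.flatMap (fun item =>
        (pvCombos (pvOptionLists (PySem.Str.split₀ (PySem.Str.strip item.1))
          (PySem.Str.split₀ (PySem.Str.strip item.2)))).map (fun line => line ++ "\n\n"))) := by
  induction content generalizing a with
  | nil =>
    simp only [List.foldl_nil, List.flatMap_nil]
    rw [show String.join ([] : List String) = "" from rfl, String.append_empty]
  | cons x xs ih =>
    rw [List.foldl_cons, pv_item, pv_lines, ih, List.flatMap_cons, pv_join_append,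
      String.append_assoc]

-- ===== VERDICT (by name: the statement is the Claim_ definition above) =====
theorem getErrorDataStr_spec : Claim_equal_getErrorDataStr := by
  intro content _ _
  unfold Spec_getErrorDataStr
  show getErrorDataStr content = getErrorDataStr_alt content
  have hA : getErrorDataStr content
      = content.foldl (fun outputStr item =>
          ((PySem.List.pyRange 0 (PySem.List.len (PySem.Str.split₀ (PySem.Str.strip item.1))) 1).foldl
            (fun outputSentences index =>
              outputSentences.foldl (fun outputBuffer itm =>
                ((PySem.Str.split? (PySem.List.pyGetD (PySem.Str.split₀ (PySem.Str.strip item.2)) index "") "/").getD []).foldl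
                  (fun outputBuffer noisyLabel =>
                    outputBuffer ++ [itm ++ " " ++ (PySem.List.pyGetD (PySem.Str.split₀ (PySem.Str.strip item.1)) index "" ++ "/" ++ noisyLabel)])
                  outputBuffer) []) [""]).foldl
            (fun outputStr itm => outputStr ++ itm ++ "\n\n") outputStr) "" := rfl
  rw [hA, pv_main, String.empty_append, getErrorDataStr_alt, pv_strjoin_empty]
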